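-- pv_equiv track=rewrite | github.com/ldct/cp | codeforces/797/D/D.py | ans
-- ===== SOURCE A (Python) =====
-- def ans(K, cells):
--     cells = [(1 if cells[i] == 'B' else 0) for i in range(len(cells))]
--
--     candidates = []
--
--     rs = sum(cells[0:K])
--     candidates += [rs]
--
--     for i in range(len(cells) - K):
--         rs -= cells[i]
--         rs += cells[K+i]
--         candidates += [rs]
--
--     return K - max(candidates)
-- ===== SOURCE B (Python) =====
-- def ans(K, cells):
--     n = len(cells)
--     pre = [0]
--     for c in cells:
--         pre.append(pre[-1] + (c == 'B'))
--     w = min(K, n)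
--     best = max(pre[i + w] - pre[i] for i in range(n - w + 1))
--     return K - best
-- ===== Notes on version B (the rewrite author's own statement) =====
-- stated objective: alternative
-- what changed: Replaced the running sliding-window update loop (subtract left cell, add right cell, accumulate a candidates list) by a prefix-sum array: each window sum is computed directly as pre[i+w]-pre[i] with w = min(K, n).
import Mathlib
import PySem

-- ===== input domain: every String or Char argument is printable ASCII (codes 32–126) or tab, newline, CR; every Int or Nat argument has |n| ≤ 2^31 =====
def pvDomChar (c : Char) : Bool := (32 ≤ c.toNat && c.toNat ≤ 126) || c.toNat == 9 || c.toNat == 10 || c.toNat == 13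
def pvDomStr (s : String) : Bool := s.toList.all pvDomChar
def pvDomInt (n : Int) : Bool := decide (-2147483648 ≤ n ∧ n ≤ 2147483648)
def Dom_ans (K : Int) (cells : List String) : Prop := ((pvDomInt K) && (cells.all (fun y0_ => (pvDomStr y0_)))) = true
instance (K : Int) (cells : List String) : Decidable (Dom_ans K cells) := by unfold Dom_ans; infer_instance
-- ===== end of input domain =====

-- B replaces A's running sliding-window update and candidates list by a prefix-sum array
-- from which each window sum is read off directly (alternative decomposition, same O(n) cost).


-- ===== PORT A =====
-- cells = [(1 if cells[i] == 'B' else 0) for i in range(len(cells))]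
-- rs = sum(cells[0:K]); candidates = [rs]; then the sliding-window loop; K - max(candidates)
def ans (K : Int) (cells : List String) : Int :=
  let cs : List Int := (PySem.List.pyRange 0 (cells.length : Int) 1).map
    (fun i => if PySem.List.pyGetD cells i "" == "B" then 1 else 0)
  let rs0 : Int := (PySem.List.slice cs (some 0) (some K)).sum
  let st := (PySem.List.pyRange 0 ((cells.length : Int) - K) 1).foldl
    (fun (st : Int × List Int) i =>
      let rs := st.1 - PySem.List.pyGetD cs i 0 + PySem.List.pyGetD cs (K + i) 0
      (rs, st.2 ++ [rs]))
    (rs0, [rs0])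
  K - ((PySem.List.max? st.2 (fun x => x)).getD 0)

-- ===== PORT B =====
-- pre = [0]; for c in cells: pre.append(pre[-1] + (c == 'B'))
-- w = min(K, n); best = max(pre[i+w] - pre[i] for i in range(n - w + 1)); K - best
def ans_alt (K : Int) (cells : List String) : Int :=
  let n : Int := (cells.length : Int)
  let pre : List Int := cells.foldl
    (fun p c => p ++ [PySem.List.pyGetD p (-1) 0 + (if c == "B" then 1 else 0)]) [0]
  let w : Int := min K n
  let sums : List Int := (PySem.List.pyRange 0 (n - w + 1) 1).map
    (fun i => PySem.List.pyGetD pre (i + w) 0 - PySem.List.pyGetD pre i 0)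
  K - ((PySem.List.max? sums (fun x => x)).getD 0)

-- ===== PRECONDITION & SPEC =====
-- A raises IndexError for every K < 0 (the loop then reads cells past the end); Pre_ excludes exactly those inputs.
def Pre_ans (K : Int) (cells : List String) : Prop := 0 ≤ K
instance (K : Int) (cells : List String) : Decidable (Pre_ans K cells) := by unfold Pre_ans; infer_instance
def pvWitness_ans : Int × List String := (2, ["B", "G", "B"])
def Spec_ans (K : Int) (cells : List String) (out : Int) : Prop := out = ans_alt K cells
instance (K : Int) (cells : List String) (out : Int) : Decidable (Spec_ans K cells out) := by unfold Spec_ans; infer_instance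

-- ===== CLAIM (what is proved, stated in full; the proofs are below) =====
def Claim_equal_ans : Prop := ∀ (K : Int) (cells : List String), Dom_ans K cells → Pre_ans K cells → Spec_ans K cells (ans K cells)

-- ===== LEMMAS AND PROOFS =====

def pvInd (c : String) : Int := if c == "B" then 1 else 0
def pvPsum (cells : List String) (j : Nat) : Int := ((cells.map pvInd).take j).sum

-- A's list comprehension equals a plain map
lemma pvCsEq (cells : List String) :
    (PySem.List.pyRange 0 (cells.length : Int) 1).map
      (fun i => if PySem.List.pyGetD cells i "" == "B" then (1:Int) else 0)
    = cells.map pvInd := by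
  conv_rhs => rw [← PySem.List.map_pyGetD_pyRange_zero' cells "", List.map_map]
  rfl

lemma pvLastAppend (l : List Int) (s : Int) : PySem.List.pyGetD (l ++ [s]) (-1) 0 = s := by
  simp [PySem.List.pyGetD, PySem.List.pyGet?, PySem.List.pyIdx?]

lemma pvPreFoldAux (rest : List String) : ∀ (acc : List Int) (s : Int),
    rest.foldl (fun p c => p ++ [PySem.List.pyGetD p (-1) 0 + (if c == "B" then (1:Int) else 0)]) (acc ++ [s])
    = (acc ++ [s]) ++ (List.range rest.length).map (fun j => s + ((rest.take (j+1)).map pvInd).sum) := by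
  induction rest with
  | nil => intro acc s; simp
  | cons c rest ih =>
    intro acc s
    have hstep : (acc ++ [s]) ++ [PySem.List.pyGetD (acc ++ [s]) (-1) 0 + (if c == "B" then (1:Int) else 0)]
        = (acc ++ [s]) ++ [s + pvInd c] := by rw [pvLastAppend]; rfl
    calc ((c :: rest).foldl (fun p c => p ++ [PySem.List.pyGetD p (-1) 0 + (if c == "B" then (1:Int) else 0)]) (acc ++ [s]))
        = rest.foldl (fun p c => p ++ [PySem.List.pyGetD p (-1) 0 + (if c == "B" then (1:Int) else 0)]) ((acc ++ [s]) ++ [s + pvInd c]) := by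
          simp only [List.foldl_cons, hstep]
      _ = ((acc ++ [s]) ++ [s + pvInd c]) ++ (List.range rest.length).map (fun j => (s + pvInd c) + ((rest.take (j+1)).map pvInd).sum) := ih _ _
      _ = (acc ++ [s]) ++ (List.range (rest.length + 1)).map (fun j => s + (((c :: rest).take (j+1)).map pvInd).sum) := by
          rw [List.range_succ_eq_map, List.map_cons, List.map_map]
          have hf : ((fun j => s + (((c :: rest).take (j+1)).map pvInd).sum) ∘ Nat.succ)
              = (fun j => (s + pvInd c) + ((rest.take (j+1)).map pvInd).sum) := by
            funext j
            simp [List.take_succ_cons]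
            ring
          rw [hf]
          simp [List.append_assoc, List.take_succ_cons]

lemma pvPreEq (cells : List String) :
    cells.foldl (fun p c => p ++ [PySem.List.pyGetD p (-1) 0 + (if c == "B" then (1:Int) else 0)]) [0]
    = (List.range (cells.length + 1)).map (pvPsum cells) := by
  have h := pvPreFoldAux cells [] 0
  simp only [List.nil_append] at h
  rw [h, List.range_succ_eq_map, List.map_cons, List.map_map]
  have hf : (pvPsum cells ∘ Nat.succ) = (fun j => (0:Int) + ((cells.take (j+1)).map pvInd).sum) := by
    funext j
    simp [pvPsum, List.map_take]
  rw [hf]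
  simp [pvPsum]

def pvWin (cells : List String) (K i : Int) : Int :=
  ((cells.map pvInd).take (K + i).toNat).sum - ((cells.map pvInd).take i.toNat).sum

lemma pvWinStep (cells : List String) (K : Int) (hK : 0 ≤ K) (a : Int) (ha : 0 ≤ a)
    (hb : a + 1 ≤ (cells.length : Int) - K) :
    pvWin cells K a - PySem.List.pyGetD (cells.map pvInd) a 0
      + PySem.List.pyGetD (cells.map pvInd) (K + a) 0 = pvWin cells K (a + 1) := by
  have hlen : (cells.map pvInd).length = cells.length := List.length_map ..
  have h1 : a.toNat < (cells.map pvInd).length := by rw [hlen]; omega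
  have h2 : (K + a).toNat < (cells.map pvInd).length := by rw [hlen]; omega
  rw [PySem.List.pyGetD_of_nonneg _ _ ha, PySem.List.pyGetD_of_nonneg _ _ (by omega : (0:Int) ≤ K + a)]
  rw [List.getD_eq_getElem _ _ h1, List.getD_eq_getElem _ _ h2]
  unfold pvWin
  have e1 : (a + 1).toNat = a.toNat + 1 := by omega
  have e2 : (K + (a + 1)).toNat = (K + a).toNat + 1 := by omega
  rw [e1, e2, List.sum_take_succ _ _ h1, List.sum_take_succ _ _ h2]
  ring

lemma pvFoldA (cells : List String) (K : Int) (hK : 0 ≤ K) :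
    ∀ (m : Nat) (a : Int) (acc : List Int), 0 ≤ a → a + (m : Int) ≤ (cells.length : Int) - K →
    (PySem.List.pyRange a (a + (m : Int)) 1).foldl
      (fun (st : Int × List Int) i =>
        let rs := st.1 - PySem.List.pyGetD (cells.map pvInd) i 0
          + PySem.List.pyGetD (cells.map pvInd) (K + i) 0
        (rs, st.2 ++ [rs]))
      (pvWin cells K a, acc)
    = (pvWin cells K (a + (m : Int)),
       acc ++ (PySem.List.pyRange a (a + (m : Int)) 1).map (fun i => pvWin cells K (i + 1))) := by
  intro m
  induction m with
  | zero => intro a acc _ _; simp [PySem.List.pyRange_one_eq_nil (le_refl a)]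
  | succ m ih =>
    intro a acc ha hb
    have hlt : a < a + ((m : Int) + 1) := by omega
    push_cast
    push_cast at hb
    rw [PySem.List.pyRange_one_cons hlt]
    simp only [List.foldl_cons, List.map_cons]
    have hstep := pvWinStep cells K hK a ha (by omega)
    have harr : a + ((m:Int) + 1) = (a + 1) + (m : Int) := by ring
    rw [hstep, harr]
    have := ih (a + 1) (acc ++ [pvWin cells K (a + 1)]) (by omega) (by omega)
    push_cast at this
    rw [this]
    simp

-- pre indexing: pyGetD into the prefix-sum table reads pvPsum
lemma pvPreGetD (cells : List String) (i : Int) (h0 : 0 ≤ i) (h1 : i ≤ (cells.length : Int)) :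
    PySem.List.pyGetD ((List.range (cells.length + 1)).map (pvPsum cells)) i 0 = pvPsum cells i.toNat := by
  rw [PySem.List.pyGetD_of_nonneg _ _ h0, PySem.List.getD_map_range _ _ _ _ (by omega)]

-- ===== VERDICT (by name: the statement is the Claim_ definition above) =====
theorem ans_spec : Claim_equal_ans := by
  intro K cells _hdom hpre
  have hK : 0 ≤ K := hpre
  unfold Spec_ans ans ans_alt
  simp only [pvCsEq, pvPreEq]
  have hrs0 : (PySem.List.slice (cells.map pvInd) (some 0) (some K)).sum = pvWin cells K 0 := by
    have h := PySem.List.slice_to (cells.map pvInd) hK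
    simp [pvWin, h]
  rw [hrs0]
  set n : Int := (cells.length : Int) with hn
  have hn0 : 0 ≤ n := by positivity
  -- B's window sums read through the prefix table
  have hw0 : 0 ≤ min K n := le_min hK hn0
  have hwn : min K n ≤ n := min_le_right _ _
  have hB : (PySem.List.pyRange 0 (n - min K n + 1) 1).map
      (fun i => PySem.List.pyGetD ((List.range (cells.length + 1)).map (pvPsum cells)) (i + min K n) 0
        - PySem.List.pyGetD ((List.range (cells.length + 1)).map (pvPsum cells)) i 0)
      = (PySem.List.pyRange 0 (n - min K n + 1) 1).map (fun i => pvWin cells (min K n) i) := by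
    apply List.map_congr_left
    intro i hi
    rw [PySem.List.mem_pyRange_one] at hi
    rw [pvPreGetD cells (i + min K n) (by omega) (by omega),
        pvPreGetD cells i (by omega) (by omega)]
    unfold pvWin pvPsum
    rw [show i + min K n = min K n + i from add_comm _ _]
  rw [hB]
  by_cases hKn : K ≤ n
  · -- K ≤ n : the two candidate lists coincide
    have hwK : min K n = K := min_eq_left hKn
    rw [hwK]
    have hm : n - K = (0 : Int) + (((n - K).toNat : Int)) := by omega
    rw [hm, pvFoldA cells K hK (n - K).toNat 0 [pvWin cells K 0] le_rfl (by omega), ← hm]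
    have htail : (PySem.List.pyRange 0 (n - K) 1).map (fun i => pvWin cells K (i + 1))
        = (PySem.List.pyRange 1 (n - K + 1) 1).map (fun i => pvWin cells K i) := by
      rw [PySem.List.pyRange_one, PySem.List.pyRange_one, List.map_map, List.map_map]
      have e : (n - K - 0).toNat = (n - K + 1 - 1).toNat := by omega
      rw [e]
      apply List.map_congr_left
      intro k _
      simp only [Function.comp]
      congr 1
      omega
    have hcons : PySem.List.pyRange 0 (n - K + 1) 1 = 0 :: PySem.List.pyRange 1 (n - K + 1) 1 := by
      have := PySem.List.pyRange_one_cons (a := 0) (b := n - K + 1) (by omega)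
      simpa using this
    rw [hcons]
    simp only [List.map_cons]
    rw [← htail]
    simp [pvWin]
  · -- n < K : a single candidate, the whole-array sum
    have hwK : min K n = n := min_eq_right (by omega)
    rw [hwK]
    have hnil : PySem.List.pyRange 0 (n - K) 1 = [] := PySem.List.pyRange_one_eq_nil (by omega)
    rw [hnil]
    have hone : n - n + 1 = (0 : Int) + 1 := by ring
    rw [hone, PySem.List.pyRange_one_singleton]
    simp only [List.foldl_nil, List.map_nil, List.map_cons]
    have h1 : pvWin cells K 0 = pvWin cells n 0 := by
      unfold pvWin
      congr 2
      · rw [List.take_of_length_le (by simp; omega), List.take_of_length_le (by simp; omega)]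
    rw [h1]
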